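-- pv_equiv track=rewrite | github.com/theeatch/DSA | Daily/1051.py | heightCheck
-- ===== SOURCE A (Python) =====
-- def heightCheck(heights: list[int]) -> int:
--     res=0
--     newnums = heights.copy()
--     heights.sort()
--     for i in range(len(heights)):
--         if heights[i] != newnums[i]:
--             res+=1
--     return res
-- ===== SOURCE B (Python) =====
-- def heightCheck(heights: list[int]) -> int:
--     # counting-sort style: tabulate frequencies, rebuild the sorted sequence
--     # from the distinct values, then compare position by position.
--     # NOTE: unlike A, this does NOT sort `heights` in place; equal return value only.
--     count = {}
--     for h in heights:
--         count[h] = count.get(h, 0) + 1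
--     expanded = []
--     for v in sorted(count):
--         expanded.extend([v] * count[v])
--     return sum(1 for s, h in zip(expanded, heights) if s != h)
-- ===== Notes on version B (the rewrite author's own statement) =====
-- stated objective: alternative
-- what changed: Instead of fully sorting a copy and comparing index by index, B builds a frequency dictionary, reconstructs the sorted sequence by expanding the sorted distinct values by their counts (counting-sort style), and counts mismatches over a zip with the original list; B also does not mutate the input list in place as A does.
import Mathlib
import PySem

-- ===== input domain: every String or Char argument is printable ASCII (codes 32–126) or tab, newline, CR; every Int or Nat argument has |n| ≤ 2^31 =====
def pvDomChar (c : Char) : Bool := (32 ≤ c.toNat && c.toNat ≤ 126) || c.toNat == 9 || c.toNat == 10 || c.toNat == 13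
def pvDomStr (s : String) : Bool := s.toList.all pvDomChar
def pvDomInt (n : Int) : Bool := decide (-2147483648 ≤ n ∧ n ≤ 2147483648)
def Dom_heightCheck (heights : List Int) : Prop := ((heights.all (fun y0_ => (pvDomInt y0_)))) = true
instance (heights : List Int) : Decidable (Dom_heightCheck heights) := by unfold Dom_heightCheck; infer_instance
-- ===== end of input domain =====

-- ===== PORT A =====
-- A sorts its argument in place; the equivalence proved here is about the RETURN value only.
-- indices i ∈ range(len) are in range, so getD 0 is exact for xs[i]
def heightCheck (heights : List Int) : Int :=
  let newnums := heights
  let sortedH := PySem.List.sorted heights (fun x => x) false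
  (List.range sortedH.length).foldl
    (fun res i => if sortedH.getD i 0 ≠ newnums.getD i 0 then res + 1 else res) 0

-- ===== PORT B =====
-- B: frequency dict, rebuild sorted sequence from distinct values, count mismatches over zip.
def heightCheck_alt (heights : List Int) : Int :=
  let cnt : PySem.Dict Int Int :=
    heights.foldl (fun d h => d.insert h (d.getD h 0 + 1)) PySem.Dict.empty
  let expanded : List Int :=
    (PySem.List.sorted cnt.keys (fun x => x) false).foldl
      (fun acc v => acc ++ List.replicate (cnt.getD v 0).toNat v) []
  (expanded.zip heights).foldl (fun r p => if p.1 ≠ p.2 then r + 1 else r) 0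

-- ===== PRECONDITION & SPEC =====
def Spec_heightCheck (heights : List Int) (out : Int) : Prop := out = heightCheck_alt heights
instance (heights : List Int) (out : Int) : Decidable (Spec_heightCheck heights out) := by unfold Spec_heightCheck; infer_instance

-- ===== CLAIM (what is proved, stated in full; the proofs are below) =====
def Claim_equal_heightCheck : Prop := ∀ (heights : List Int), Dom_heightCheck heights → Spec_heightCheck heights (heightCheck heights)

-- ===== LEMMAS AND PROOFS =====

-- ===== VERDICT (by name: the statement is the Claim_ definition above) =====
-- B's expansion equals Python's sorted(heights)
theorem count_flatMap_replicate (ks : List Int) (f : Int → Nat) (x : Int) (hnd : ks.Nodup) :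
    (ks.flatMap (fun v => List.replicate (f v) v)).count x
      = if x ∈ ks then f x else 0 := by
  induction ks with
  | nil => simp
  | cons k t ih =>
    rcases List.nodup_cons.mp hnd with ⟨hk, hnd'⟩
    simp only [List.flatMap_cons, List.count_append, List.count_replicate, ih hnd',
      List.mem_cons]
    by_cases hx : x = k
    · subst hx; simp [hk]
    · simp [hx, Ne.symm hx]

theorem pairwise_flatMap_replicate (ks : List Int) (f : Int → Nat)
    (h : ks.Pairwise (· < ·)) :
    (ks.flatMap (fun v => List.replicate (f v) v)).Pairwise (· ≤ ·) := by
  induction ks with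
  | nil => simp
  | cons k t ih =>
    rcases List.pairwise_cons.mp h with ⟨hk, ht⟩
    simp only [List.flatMap_cons]
    refine List.pairwise_append.mpr ⟨?_, ih ht, ?_⟩
    · exact List.pairwise_replicate.mpr (Or.inr le_rfl)
    · intro a ha b hb
      obtain rfl := List.eq_of_mem_replicate ha
      obtain ⟨v, hv, hbv⟩ := List.mem_flatMap.mp hb
      obtain rfl := List.eq_of_mem_replicate hbv
      exact le_of_lt (hk _ hv)

theorem expand_eq_sorted (heights : List Int) :
    (PySem.List.sorted (PySem.Set.ofList heights) (fun x => x) false).flatMap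
      (fun v => List.replicate (heights.count v) v)
      = PySem.List.sorted heights (fun x => x) false := by
  set ks := PySem.List.sorted (PySem.Set.ofList heights) (fun x => x) false with hks
  have hlt : ks.Pairwise (· < ·) := PySem.List.sorted_ofList_pairwise_lt heights
  have hnd : ks.Nodup := hlt.nodup
  have hmem : ∀ x : Int, x ∈ ks ↔ x ∈ heights := by
    intro x
    simp [hks, PySem.List.mem_sorted, PySem.Set.mem_ofList]
  have hperm : (ks.flatMap (fun v => List.replicate (heights.count v) v)).Perm heights := by
    rw [List.perm_iff_count]
    intro x
    rw [count_flatMap_replicate ks _ x hnd]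
    by_cases hx : x ∈ heights
    · simp [(hmem x).mpr hx]
    · simp [List.count_eq_zero.mpr hx]
  exact (PySem.List.sorted_id_eq_of_perm_of_pairwise _ _ hperm
    (pairwise_flatMap_replicate ks _ hlt)).symm

theorem zip_count_eq_range_count (s h : List Int) (hlen : s.length = h.length) (c : Int) :
    (List.range s.length).foldl
      (fun res i => if s.getD i 0 ≠ h.getD i 0 then res + 1 else res) c
    = (s.zip h).foldl (fun r p => if p.1 ≠ p.2 then r + 1 else r) c := by
  induction s generalizing h c with
  | nil => simp
  | cons x s' ih =>
    cases h with
    | nil => simp at hlen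
    | cons y h' =>
      simp only [List.length_cons, List.range_succ_eq_map, List.foldl_cons, List.foldl_map,
        List.zip_cons_cons, List.getD_cons_zero, List.getD_cons_succ]
      exact ih h' (by simpa using hlen) _

theorem heightCheck_spec : Claim_equal_heightCheck := by
  intro heights _
  unfold Spec_heightCheck heightCheck heightCheck_alt
  simp only [PySem.Dict.foldl_insert_getD_add_one_eq_counter, PySem.Dict.keys_counter,
    PySem.Dict.getD_counter, PySem.List.foldl_append_eq_flatMap, Int.toNat_natCast, List.nil_append]
  rw [expand_eq_sorted]
  refine zip_count_eq_range_count _ _ ?_ 0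
  exact (PySem.List.sorted_perm heights (fun x : Int => x) false).length_eq
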